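-- pv_equiv track=rewrite | github.com/wxlovolxw/algorithm-sql-practice | Python Algorithm/programmers/Programmers/mode.py | solution
-- ===== SOURCE A (Python) =====
-- def solution(code):
--     mode = 0
--     answer = ''
--     for i, x in enumerate(code):
--         if x == '1' and mode == 0:
--             mode = 1
--         elif x == '1' and mode == 1:
--             mode = 0
--         elif (x != 1) and (mode == 0) and (i % 2 == 0):
--             answer += x
--         elif (x != 1) and (mode == 1) and (i % 2 != 0):
--             answer += x
--
--     return answer
-- ===== SOURCE B (Python) =====
-- def solution(code):
--     # A char at index i is kept iff i and the number of '1's before i have equal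
--     # parity, i.e. iff the number of preceding non-'1' chars is even: so the
--     # answer is every second character of the string with all '1's removed.
--     return code.replace('1', '')[::2]
-- ===== Notes on version B (the rewrite author's own statement) =====
-- stated objective: simpler
-- what changed: Replaces A's fused toggling state machine (mode flag mutated and chars appended index by index) with the closed-form observation that the kept characters are exactly every second character of the input with all '1' characters deleted, so B is just code.replace('1','')[::2].
import Mathlib
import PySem

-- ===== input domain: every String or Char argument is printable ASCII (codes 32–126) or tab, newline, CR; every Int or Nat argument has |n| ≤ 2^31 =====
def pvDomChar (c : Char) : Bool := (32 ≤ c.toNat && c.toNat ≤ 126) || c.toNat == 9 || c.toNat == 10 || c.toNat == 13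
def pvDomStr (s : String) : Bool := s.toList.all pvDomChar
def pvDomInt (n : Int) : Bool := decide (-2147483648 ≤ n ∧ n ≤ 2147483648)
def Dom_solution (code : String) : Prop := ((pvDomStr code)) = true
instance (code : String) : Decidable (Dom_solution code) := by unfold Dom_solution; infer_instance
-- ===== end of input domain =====

-- B replaces A's per-index toggling state machine by the closed observation that the kept
-- characters are exactly every second character of the string with all '1's deleted
-- (code.replace('1','')[::2]); objective: simpler, no speed claim.

-- ===== PORT A =====
-- A's loop body; in Python the tests `x != 1` compare a str with an int and are
-- always True, so they are transliterated as vacuous (dropped) conjuncts.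
def stepA (st : Int × String) (ix : Int × Char) : Int × String :=
  if ix.2 == '1' && st.1 == 0 then (1, st.2)
  else if ix.2 == '1' && st.1 == 1 then (0, st.2)
  else if st.1 == 0 && PySem.Int.mod ix.1 2 == 0 then (st.1, st.2.push ix.2)
  else if st.1 == 1 && !(PySem.Int.mod ix.1 2 == 0) then (st.1, st.2.push ix.2)
  else (st.1, st.2)

def solution (code : String) : String :=
  ((PySem.List.enumerate code.toList 0).foldl stepA (0, "")).2

-- ===== PORT B =====
-- code.replace('1','')[::2]; the slice step is 2 ≠ 0, so Python's slice always
-- returns (the `none` branch of slice? is unreachable and defaults to "").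
def solution_alt (code : String) : String :=
  match PySem.Str.slice? (PySem.Str.replace code "1" "") none none 2 with
  | some s => s
  | none => ""

-- ===== PRECONDITION & SPEC =====
def Spec_solution (code : String) (out : String) : Prop := out = solution_alt code
instance (code : String) (out : String) : Decidable (Spec_solution code out) := by unfold Spec_solution; infer_instance

-- ===== CLAIM (what is proved, stated in full; the proofs are below) =====
def Claim_equal_solution : Prop := ∀ (code : String), Dom_solution code → Spec_solution code (solution code)

-- ===== LEMMAS AND PROOFS =====

-- every second element, starting with the first
def everyOther {α : Type} : List α → List α
  | [] => []
  | [a] => [a]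
  | a :: _ :: t => a :: everyOther t

-- boolean-fuelled form of everyOther (p = "keep the next element")
def eoB {α : Type} (p : Bool) : List α → List α
  | [] => []
  | a :: t => if p then a :: eoB (!p) t else eoB (!p) t

theorem eoB_true_eq_everyOther {α : Type} (l : List α) : eoB true l = everyOther l := by
  induction l using everyOther.induct with
  | case1 => simp [eoB, everyOther]
  | case2 a => simp [eoB, everyOther]
  | case3 a b t ih => simp [eoB, everyOther, ih]

-- what A keeps: p = "the next non-'1' character is kept", toggled by non-'1' chars
def keptA (p : Bool) : List Char → List Char
  | [] => []
  | c :: t => if c = '1' then keptA p t else (if p then c :: keptA (!p) t else keptA (!p) t)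

theorem keptA_eq_eoB_filter (l : List Char) : ∀ p, keptA p l = eoB p (l.filter (· ≠ '1')) := by
  induction l with
  | nil => intro p; simp [keptA, eoB]
  | cons c t ih =>
    intro p
    by_cases hc : c = '1' <;> simp [keptA, hc, eoB, ih]

theorem push_append_ofList (ans : String) (c : Char) (L : List Char) :
    ans.push c ++ String.ofList L = ans ++ String.ofList (c :: L) := by
  apply String.toList_injective
  simp

-- A's fold invariant: state (m, ans) with m ∈ {0,1}; p := (i % 2 == m)
theorem A_inv (l : List Char) : ∀ (i m : Int) (ans : String), (m = 0 ∨ m = 1) →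
    ((PySem.List.enumerate l i).foldl stepA (m, ans)).2
      = ans ++ String.ofList (keptA (i % 2 == m) l) := by
  induction l with
  | nil => intro i m ans _; simp [PySem.List.enumerate_nil, keptA]
  | cons c t ih =>
    intro i m ans hm
    rw [PySem.List.enumerate_cons]
    have hmodi : PySem.Int.mod i 2 = i % 2 := PySem.Int.mod_eq_emod_of_pos (by omega)
    have hib : i % 2 = 0 ∨ i % 2 = 1 := by omega
    have hi1 : (i + 1) % 2 = 1 - i % 2 := by omega
    by_cases hc : c = '1'
    · subst hc
      have hstep : stepA (m, ans) (i, '1') = (1 - m, ans) := by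
        simp only [stepA]
        rcases hm with h | h <;> simp [h]
      have hm' : (1 - m = 0 ∨ 1 - m = 1) := by omega
      simp only [List.foldl_cons, hstep, ih (i+1) (1-m) ans hm']
      have hpar : ((i+1) % 2 == 1 - m) = (i % 2 == m) := by
        rw [hi1]; rcases hm with h | h <;> rcases hib with h2 | h2 <;> simp [h, h2]
      simp [keptA, hpar]
    · have hk : (i % 2 == m) = true ∨ (i % 2 == m) = false := by
        rcases Bool.eq_false_or_eq_true (i % 2 == m) with h | h <;> tauto
      have hpar : ((i+1) % 2 == m) = !(i % 2 == m) := by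
        rw [hi1]; rcases hm with h | h <;> rcases hib with h2 | h2 <;> simp [h, h2]
      rcases hk with h | h
      · -- kept
        have hme : i % 2 = m := by simpa using h
        have hstep : stepA (m, ans) (i, c) = (m, ans.push c) := by
          simp only [stepA, hmodi]
          rcases hm with h1 | h1 <;> simp [h1, hc, h1 ▸ hme]
        simp only [List.foldl_cons, hstep, ih (i+1) m (ans.push c) hm, push_append_ofList]
        simp [keptA, hc, hpar, h]
      · -- dropped
        have hme : ¬ (i % 2 = m) := by simpa using h
        have hstep : stepA (m, ans) (i, c) = (m, ans) := by
          simp only [stepA, hmodi]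
          rcases hm with h1 | h1 <;> rcases hib with h2 | h2 <;> simp_all
        simp only [List.foldl_cons, hstep, ih (i+1) m ans hm]
        simp [keptA, hc, hpar, h]

-- replace with a one-char pattern and empty replacement is filter
theorem replace_go_single (o : Char) : ∀ (fuel : Nat) (l acc : List Char), l.length ≤ fuel →
    PySem.Chars.replace.go [o] [] fuel l acc = acc.reverse ++ l.filter (· ≠ o) := by
  intro fuel
  induction fuel with
  | zero =>
    intro l acc h
    have : l = [] := by cases l <;> simp_all
    subst this; simp [PySem.Chars.replace.go]
  | succ n ih =>
    intro l acc h
    cases l with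
    | nil => simp [PySem.Chars.replace.go]
    | cons c t =>
      by_cases hc : c = o
      · subst hc
        have hpre : [c].isPrefixOf (c :: t) = true := by simp [List.isPrefixOf]
        rw [PySem.Chars.replace.go]
        simp only [hpre, if_true, List.reverse_nil, List.nil_append]
        rw [show List.drop [c].length (c :: t) = t by simp]
        rw [ih t acc (by simp at h; omega)]
        simp
      · have hpre : [o].isPrefixOf (c :: t) = false := by
          simp [List.isPrefixOf]; exact fun he => hc he.symm
        rw [PySem.Chars.replace.go]
        simp only [hpre, Bool.false_eq_true, if_false]
        rw [ih t (c :: acc) (by simp at h; omega)]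
        simp [hc]

theorem replace_single (l : List Char) (o : Char) :
    PySem.Chars.replace l [o] [] = l.filter (· ≠ o) := by
  rw [PySem.Chars.replace]
  simp only [List.isEmpty_cons, Bool.false_eq_true, if_false]
  simpa using replace_go_single o l.length l [] (le_refl _)

-- the [::2] slice is everyOther
theorem filterMap_two_step {α : Type} (xs : List α) :
    List.filterMap (fun k => xs[2 * k]?) (List.range ((xs.length + 1) / 2)) = everyOther xs := by
  induction xs using everyOther.induct with
  | case1 => simp [everyOther]
  | case2 a => simp [everyOther]
  | case3 a b t ih =>
    have hlen : ((a :: b :: t).length + 1) / 2 = (t.length + 1) / 2 + 1 := by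
      simp [List.length_cons]; omega
    rw [hlen, List.range_succ_eq_map, List.filterMap_cons, List.filterMap_map]
    have h0 : (a :: b :: t)[2 * 0]? = some a := by simp
    rw [h0]
    have hfun : (fun k => (a :: b :: t)[2 * k]?) ∘ (· + 1) = fun k => t[2 * k]? := by
      funext k
      simp [show 2 * (k + 1) = 2 * k + 1 + 1 by omega]
    rw [hfun, ih]
    simp [everyOther]

theorem sliceIndices_twostep (n : Nat) :
    PySem.List.sliceIndices n none none 2 = ((0:Int), (n:Int), (2:Int)) := by
  simp [PySem.List.sliceIndices]

theorem slice2_eq {α : Type} (xs : List α) :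
    PySem.List.slice? xs none none 2 = some (everyOther xs) := by
  rw [PySem.List.slice?]
  rw [if_neg (by norm_num)]
  rw [sliceIndices_twostep]
  dsimp only
  rw [if_pos (by norm_num : (0:Int) < 2)]
  congr 1
  have hcnt : (if (0:Int) < xs.length then (((xs.length:Int) - 0 + 2 - 1) / 2).toNat else 0)
      = (xs.length + 1) / 2 := by
    split_ifs with h
    · omega
    · omega
  rw [hcnt]
  have hfun : (fun (k : Nat) => xs[((0:Int) + 2 * (k:Int)).toNat]?) = fun k => xs[2 * k]? := by
    funext k
    congr 1
    omega
  rw [hfun]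
  exact filterMap_two_step xs

-- ===== VERDICT (by name: the statement is the Claim_ definition above) =====
theorem solution_spec : Claim_equal_solution := by
  intro code _
  unfold Spec_solution solution solution_alt
  have hA := A_inv code.toList 0 0 "" (by left; rfl)
  simp only [show ((0:Int) % 2 == (0:Int)) = true by decide] at hA
  rw [hA]
  rw [PySem.Str.slice?]
  have hrep : (PySem.Str.replace code "1" "").toList = code.toList.filter (· ≠ '1') := by
    rw [PySem.Str.toList_replace]
    simpa using replace_single code.toList '1'
  simp only [PySem.Chars.slice?_eq_listSlice?, hrep, slice2_eq]
  simp [keptA_eq_eoB_filter, eoB_true_eq_everyOther]
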